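-- pv_equiv track=rewrite | github.com/pypi-data/pypi-mirror-375 | packages/build-pip-package/build_pip_package-2025.9.91807-py3-none-any.whl/build_pip_package/main.py | _sanitize_repo_description
-- ===== SOURCE A (Python) =====
-- from typing import Dict, Optional, Tuple
--
-- def _sanitize_repo_description(description: Optional[str]) -> str:
--     if not description:
--         return ""
--     # Replace newlines/tabs, strip C0 controls + DEL, collapse whitespace, cap length
--     s = (
--         description.replace("\r", " ")
--         .replace("\n", " ")
--         .replace("\t", " ")
--     )
--     s = "".join(ch for ch in s if ord(ch) >= 32 and ord(ch) != 127)
--     s = " ".join(s.split())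
--     return s[:512]
-- ===== SOURCE B (Python) =====
-- from typing import Optional
--
-- def _sanitize_repo_description(description: "Optional[str]") -> str:
--     if not description:
--         return ""
--     out = []
--     pending = False
--     for ch in description:
--         if ord(ch) in (9, 10, 13):
--             ch = " "
--         if ord(ch) < 32 or ord(ch) == 127:
--             continue
--         if ch.isspace():
--             pending = bool(out)
--         elif pending:
--             out.append(" ")
--             out.append(ch)
--             pending = False
--         else:
--             out.append(ch)
--     return "".join(out)[:512]
-- ===== Notes on version B (the rewrite author's own statement) =====
-- stated objective: alternative
-- what changed: Replaces the four-pass pipeline (three replace passes, a filter pass, split+join) by a single character pass maintaining an output buffer and a pending-separator flag.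
import Mathlib
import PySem

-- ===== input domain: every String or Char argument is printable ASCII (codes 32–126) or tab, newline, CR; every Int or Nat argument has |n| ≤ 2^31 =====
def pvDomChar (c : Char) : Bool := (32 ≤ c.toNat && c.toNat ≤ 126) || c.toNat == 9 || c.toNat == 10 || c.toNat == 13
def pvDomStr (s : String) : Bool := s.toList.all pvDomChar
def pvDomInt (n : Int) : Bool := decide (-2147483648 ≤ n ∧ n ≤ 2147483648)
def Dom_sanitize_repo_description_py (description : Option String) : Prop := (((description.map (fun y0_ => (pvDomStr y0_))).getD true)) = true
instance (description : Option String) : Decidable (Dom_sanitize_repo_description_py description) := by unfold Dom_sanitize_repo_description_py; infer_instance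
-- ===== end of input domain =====

-- B replaces A's four passes (replace ×3, control-char filter, split/join) by a single pass with a
-- pending-separator flag; same result, alternative decomposition (no speed claim).

-- ===== PORT A =====
def sanitize_repo_description_py (description : Option String) : String :=
  match description with
  | none => ""
  | some desc =>
    if desc = "" then ""
    else
      let s1 := PySem.Str.replace (PySem.Str.replace (PySem.Str.replace desc "\r" " ") "\n" " ") "\t" " "
      let s2 := PySem.Str.join "" ((s1.toList.filter (fun ch => decide (32 ≤ ch.toNat) && decide (ch.toNat ≠ 127))).map (fun c => String.ofList [c]))
      let s3 := PySem.Str.join " " (PySem.Str.split₀ s2)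
      PySem.Str.slice s3 none (some 512)

-- ===== PORT B =====
def pvAltGo : List Char → List Char → Bool → List Char
  | [], out, _ => out
  | c :: rest, out, pending =>
    let c := if c.toNat = 9 ∨ c.toNat = 10 ∨ c.toNat = 13 then ' ' else c
    if c.toNat < 32 ∨ c.toNat = 127 then pvAltGo rest out pending
    else if PySem.Chars.isspace c then pvAltGo rest out (!out.isEmpty)
    else if pending then pvAltGo rest (out ++ [' ', c]) false
    else pvAltGo rest (out ++ [c]) false

def sanitize_repo_description_py_alt (description : Option String) : String :=
  match description with
  | none => ""
  | some desc =>
    if desc = "" then ""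
    else String.ofList ((pvAltGo desc.toList [] false).take 512)

-- ===== PRECONDITION & SPEC =====
def Spec_sanitize_repo_description_py (description : Option String) (out : String) : Prop := out = sanitize_repo_description_py_alt description
instance (description : Option String) (out : String) : Decidable (Spec_sanitize_repo_description_py description out) := by unfold Spec_sanitize_repo_description_py; infer_instance

-- ===== CLAIM (what is proved, stated in full; the proofs are below) =====
def Claim_equal_sanitize_repo_description_py : Prop := ∀ (description : Option String), Dom_sanitize_repo_description_py description → Spec_sanitize_repo_description_py description (sanitize_repo_description_py description)

-- ===== LEMMAS AND PROOFS =====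

-- characters are determined by their code point
lemma char_toNat_inj (c d : Char) (h : c.toNat = d.toNat) : c = d := by
  apply Char.ext
  apply UInt32.toNat_inj.mp
  simpa using h

-- single-character str.replace is a map over the characters
lemma replace_go_single (c d : Char) : ∀ (fuel : Nat) (l acc : List Char), l.length ≤ fuel →
    PySem.Chars.replace.go [c] [d] fuel l acc = acc.reverse ++ l.map (fun x => if x = c then d else x) := by
  intro fuel
  induction fuel with
  | zero => intro l acc h; cases l with
    | nil => simp [PySem.Chars.replace.go]
    | cons x t => simp at h
  | succ n ih =>
    intro l acc h
    cases l with
    | nil => simp [PySem.Chars.replace.go]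
    | cons x t =>
      simp only [PySem.Chars.replace.go, List.isPrefixOf, List.map]
      by_cases hx : x = c
      · simp [hx, ih t (d :: acc) (by simpa using Nat.le_of_succ_le_succ h)]
      · simp [hx, Ne.symm hx, ih t (x :: acc) (by simpa using Nat.le_of_succ_le_succ h)]

lemma replace_single (c d : Char) (s : List Char) :
    PySem.Chars.replace s [c] [d] = s.map (fun x => if x = c then d else x) := by
  simp [PySem.Chars.replace, replace_go_single c d s.length s [] le_rfl]

-- the combined remap of the three replace passes
def pvMp (c : Char) : Char := if c.toNat = 9 ∨ c.toNat = 10 ∨ c.toNat = 13 then ' ' else c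

lemma maps_eq (cs : List Char) :
    ((cs.map (fun x => if x = '\r' then ' ' else x)).map (fun x => if x = '\n' then ' ' else x)).map
        (fun x => if x = '\t' then ' ' else x) = cs.map pvMp := by
  simp only [List.map_map]
  apply List.map_congr_left
  intro x _
  simp only [Function.comp]
  unfold pvMp
  by_cases h13 : x.toNat = 13
  · have hx : x = '\r' := char_toNat_inj _ _ (by rw [h13]; decide)
    subst hx; decide
  · by_cases h10 : x.toNat = 10
    · have hx : x = '\n' := char_toNat_inj _ _ (by rw [h10]; decide)
      subst hx; decide
    · by_cases h9 : x.toNat = 9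
      · have hx : x = '\t' := char_toNat_inj _ _ (by rw [h9]; decide)
        subst hx; decide
      · have hr : x ≠ '\r' := fun hx => h13 (by rw [hx]; decide)
        have hn : x ≠ '\n' := fun hx => h10 (by rw [hx]; decide)
        have ht : x ≠ '\t' := fun hx => h9 (by rw [hx]; decide)
        rw [if_neg hr, if_neg hn, if_neg ht, if_neg (by omega)]

lemma pvMp_range (c : Char) (h : pvDomChar c = true) :
    32 ≤ (pvMp c).toNat ∧ (pvMp c).toNat ≤ 126 := by
  unfold pvMp
  by_cases h9 : c.toNat = 9 ∨ c.toNat = 10 ∨ c.toNat = 13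
  · rw [if_pos h9]; exact ⟨by decide, by decide⟩
  · rw [if_neg h9]
    simp only [pvDomChar, Bool.or_eq_true, Bool.and_eq_true, decide_eq_true_eq, beq_iff_eq] at h
    exact ⟨by omega, by omega⟩

lemma isspace_printable (c : Char) (h32 : 32 ≤ c.toNat) (h126 : c.toNat ≤ 126) :
    PySem.Chars.isspace c = true ↔ c = ' ' := by
  constructor
  · intro hs
    simp [PySem.Chars.isspace] at hs
    exact char_toNat_inj c ' ' (by have h32' : (' ').toNat = 32 := rfl; omega)
  · intro hs; subst hs; decide

-- a plain join-with-one-space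
def pvJ : List (List Char) → List Char
  | [] => []
  | [w] => w
  | w :: ws => w ++ ' ' :: pvJ ws

lemma pvJ_cons (v : List Char) (ws : List (List Char)) (h : ws ≠ []) :
    pvJ (v :: ws) = v ++ ' ' :: pvJ ws := by
  cases ws with
  | nil => simp at h
  | cons u us => rfl

lemma join_eq_pvJ (ws : List (List Char)) : PySem.Chars.join [' '] ws = pvJ ws := by
  induction ws with
  | nil => simp [PySem.Chars.join, List.intercalate, pvJ]
  | cons w ws ih =>
    cases ws with
    | nil => simp [PySem.Chars.join, List.intercalate, pvJ]
    | cons v vs =>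
      simp only [pvJ, ← ih]
      simp [PySem.Chars.join, List.intercalate, List.intersperse]

lemma pvJ_snoc (ws : List (List Char)) (w : List Char) :
    pvJ (ws ++ [w]) = if ws = [] then w else pvJ ws ++ ' ' :: w := by
  induction ws with
  | nil => simp [pvJ]
  | cons v vs ih =>
    cases vs with
    | nil => simp [pvJ]
    | cons u us =>
      rw [List.cons_append, pvJ_cons v ((u :: us) ++ [w]) (by simp), ih]
      simp [pvJ_cons v (u :: us) (by simp)]

lemma pvJ_ne_nil (ws : List (List Char)) (h : ws ≠ []) (h2 : ∀ w ∈ ws, w ≠ []) : pvJ ws ≠ [] := by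
  cases ws with
  | nil => simp at h
  | cons w vs =>
    have hw := h2 w (by simp)
    cases vs with
    | nil => simpa [pvJ] using hw
    | cons u us => simp [pvJ, hw]

lemma pvJ_isEmpty_rev (acc : List (List Char)) (hacc : ∀ w ∈ acc, w ≠ []) :
    (pvJ acc.reverse).isEmpty = acc.isEmpty := by
  by_cases hacc0 : acc = []
  · subst hacc0; rfl
  · have h1 : pvJ acc.reverse ≠ [] := pvJ_ne_nil _ (by simpa using hacc0)
      (by intro w hw; exact hacc w (by simpa using hw))
    rw [List.isEmpty_eq_false_iff.mpr h1, List.isEmpty_eq_false_iff.mpr hacc0]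

-- B's loop tracks str.split's accumulator: the joined words so far plus a pending flag
lemma key (cs : List Char) (h : ∀ c ∈ cs, pvDomChar c = true) :
    ∀ (cur : List Char) (acc : List (List Char)), (∀ w ∈ acc, w ≠ []) →
    pvAltGo cs (pvJ ((if cur = [] then acc else cur.reverse :: acc).reverse))
      (if cur = [] then !acc.isEmpty else false)
      = pvJ (PySem.Chars.split₀.go (cs.map pvMp) cur acc) := by
  induction cs with
  | nil =>
    intro cur acc hacc
    by_cases hcur : cur = [] <;>
      simp [hcur, pvAltGo, PySem.Chars.split₀.go, List.isEmpty_iff]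
  | cons c rest ih =>
    intro cur acc hacc
    have hc := h c (by simp)
    have hrest : ∀ x ∈ rest, pvDomChar x = true := fun x hx => h x (by simp [hx])
    obtain ⟨h32, h126⟩ := pvMp_range c hc
    have hstep : pvAltGo (c :: rest) (pvJ ((if cur = [] then acc else cur.reverse :: acc).reverse)) (if cur = [] then !acc.isEmpty else false)
        = (if (pvMp c).toNat < 32 ∨ (pvMp c).toNat = 127 then pvAltGo rest (pvJ ((if cur = [] then acc else cur.reverse :: acc).reverse)) (if cur = [] then !acc.isEmpty else false)
           else if PySem.Chars.isspace (pvMp c) then pvAltGo rest (pvJ ((if cur = [] then acc else cur.reverse :: acc).reverse)) (!(pvJ ((if cur = [] then acc else cur.reverse :: acc).reverse)).isEmpty)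
           else if (if cur = [] then !acc.isEmpty else false) then pvAltGo rest (pvJ ((if cur = [] then acc else cur.reverse :: acc).reverse) ++ [' ', pvMp c]) false
           else pvAltGo rest (pvJ ((if cur = [] then acc else cur.reverse :: acc).reverse) ++ [pvMp c]) false) := by
      simp only [pvAltGo, pvMp]
    rw [hstep, if_neg (by omega)]
    simp only [List.map_cons]
    by_cases hsp : pvMp c = ' '
    · rw [if_pos ((isspace_printable _ h32 h126).mpr hsp)]
      have goeq : PySem.Chars.split₀.go (pvMp c :: rest.map pvMp) cur acc
          = if cur = [] then PySem.Chars.split₀.go (rest.map pvMp) [] acc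
            else PySem.Chars.split₀.go (rest.map pvMp) [] (cur.reverse :: acc) := by
        simp only [PySem.Chars.split₀.go, hsp]
        rw [if_pos (by decide : PySem.Chars.isspace ' ' = true)]
        by_cases hcur : cur = [] <;> simp [hcur, List.isEmpty_iff]
      rw [goeq]
      by_cases hcur : cur = []
      · subst hcur
        simp only [reduceIte]
        rw [pvJ_isEmpty_rev acc hacc]
        simpa using ih hrest [] acc hacc
      · rw [if_neg hcur, if_neg hcur]
        have hacc' : ∀ w ∈ (cur.reverse :: acc), w ≠ [] := by
          intro w hw
          rcases List.mem_cons.mp hw with hw | hw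
          · simp [hw, hcur]
          · exact hacc w hw
        rw [show (!(pvJ ((cur.reverse :: acc).reverse)).isEmpty) = !(cur.reverse :: acc).isEmpty from by
          rw [pvJ_isEmpty_rev _ hacc']]
        simpa using ih hrest [] (cur.reverse :: acc) hacc'
    · rw [if_neg (by rw [isspace_printable _ h32 h126]; exact hsp)]
      have goeq : PySem.Chars.split₀.go (pvMp c :: rest.map pvMp) cur acc
          = PySem.Chars.split₀.go (rest.map pvMp) (pvMp c :: cur) acc := by
        simp only [PySem.Chars.split₀.go]
        rw [if_neg (by rw [isspace_printable _ h32 h126]; exact hsp)]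
      rw [goeq]
      have hnext := ih hrest (pvMp c :: cur) acc hacc
      rw [if_neg (by simp : (pvMp c :: cur) ≠ []), if_neg (by simp : (pvMp c :: cur) ≠ [])] at hnext
      rw [← hnext]
      by_cases hcur : cur = []
      · subst hcur
        simp only [reduceIte]
        by_cases hacc0 : acc = []
        · subst hacc0
          simp [pvJ]
        · rw [show (!acc.isEmpty) = true from by simp [List.isEmpty_eq_false_iff.mpr hacc0]]
          simp [pvJ_snoc, hacc0]
      · rw [if_neg hcur, if_neg hcur]
        by_cases hacc0 : acc = []
        · subst hacc0; simp [pvJ]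
        · simp [pvJ_snoc, hacc0]

-- ===== VERDICT (by name: the statement is the Claim_ definition above) =====
theorem sanitize_repo_description_py_spec : Claim_equal_sanitize_repo_description_py := by
  intro d hdom
  unfold Spec_sanitize_repo_description_py
  cases d with
  | none => rfl
  | some desc =>
    by_cases hd : desc = ""
    · simp [sanitize_repo_description_py, sanitize_repo_description_py_alt, hd]
    · have hchars : ∀ c ∈ desc.toList, pvDomChar c = true := by
        simp only [Dom_sanitize_repo_description_py, Option.map_some, Option.getD_some,
          pvDomStr, List.all_eq_true] at hdom
        exact hdom
      apply String.toList_inj.mp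
      simp only [sanitize_repo_description_py, sanitize_repo_description_py_alt, if_neg hd]
      -- A side: reduce to characters
      have hs1 : (PySem.Str.replace (PySem.Str.replace (PySem.Str.replace desc "\r" " ") "\n" " ") "\t" " ").toList
          = desc.toList.map pvMp := by
        simp only [PySem.Str.toList_replace]
        rw [show "\r".toList = ['\r'] from rfl, show "\n".toList = ['\n'] from rfl,
          show "\t".toList = ['\t'] from rfl, show " ".toList = [' '] from rfl]
        rw [replace_single, replace_single, replace_single, maps_eq]
      have hfilter : ((desc.toList.map pvMp).filter (fun ch => decide (32 ≤ ch.toNat) && decide (ch.toNat ≠ 127)))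
          = desc.toList.map pvMp := by
        apply List.filter_eq_self.mpr
        intro c hcm
        rcases List.mem_map.mp hcm with ⟨x, hx, hmx⟩
        obtain ⟨l32, l126⟩ := pvMp_range x (hchars x hx)
        rw [← hmx]
        simp only [Bool.and_eq_true, decide_eq_true_eq]
        omega
      have hs2 : (PySem.Str.join "" ((((desc.toList.map pvMp)).map (fun c => String.ofList [c]))) ).toList
          = desc.toList.map pvMp := by
        simp only [PySem.Str.toList_join]
        rw [show ("" : String).toList = [] from rfl]
        rw [List.map_map]
        have : (String.toList ∘ fun c => String.ofList [c]) = fun c => [c] := by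
          funext c; simp
        rw [this, PySem.Chars.join_nil_singletons]
      rw [hs1, hfilter]
      simp only [PySem.Str.toList_slice, PySem.Chars.slice_eq_listSlice]
      rw [PySem.List.slice_to _ (by norm_num)]
      simp only [PySem.Str.toList_join]
      rw [show (" " : String).toList = [' '] from rfl]
      have hsplit : ((PySem.Str.split₀ (PySem.Str.join "" ((desc.toList.map pvMp).map (fun c => String.ofList [c])))).map String.toList)
          = PySem.Chars.split₀ (desc.toList.map pvMp) := by
        rw [PySem.Str.split₀_map_toList, hs2]
      rw [hsplit, join_eq_pvJ]
      -- B side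
      have hB := key desc.toList hchars [] [] (by simp)
      simp only [reduceIte, List.reverse_nil] at hB
      rw [show pvJ [] = [] from rfl] at hB
      rw [show PySem.Chars.split₀ (desc.toList.map pvMp) = PySem.Chars.split₀.go (desc.toList.map pvMp) [] [] from rfl]
      rw [← hB]
      simp
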